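-- pv_equiv track=rewrite | github.com/ha-rsh/Codechef-problems | Codechef Python/maximizing_lis.py | max_lis
-- ===== SOURCE A (Python) =====
-- import bisect
--
-- def max_lis(nums: list, n:int):
--     my_list = []
--     ele = [0] * n
--     for i in range(n):
--         if not my_list:
--            my_list.append(nums[i])
--            ele[i] = len(my_list)
--            continue
--         val = bisect.bisect_left(my_list, nums[i])
--         if val == len(my_list): my_list.append(nums[i])
--         else: my_list[val] = nums[i]
--         ele[i] = len(my_list)
--
--     return ele
-- ===== SOURCE B (Python) =====
-- def max_lis(nums: list, n: int):
--     # Classic O(n^2) LIS dynamic programming: dp[i] = LIS length ending at i,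
--     # ele[i] = running maximum of dp over the prefix = LIS length of nums[:i+1].
--     dp = []
--     ele = []
--     best = 0
--     for i in range(n):
--         x = nums[i]
--         m = 0
--         for j in range(i):
--             if nums[j] < x and dp[j] > m:
--                 m = dp[j]
--         dp.append(m + 1)
--         if m + 1 > best:
--             best = m + 1
--         ele.append(best)
--     return ele
-- ===== Notes on version B (the rewrite author's own statement) =====
-- stated objective: alternative
-- what changed: Replaced patience sorting (bisect_left on a tails list) by the classic quadratic LIS dynamic programming: dp[i] = 1 + max dp[j] over earlier smaller elements, with ele[i] the running maximum of dp.
import Mathlib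
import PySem

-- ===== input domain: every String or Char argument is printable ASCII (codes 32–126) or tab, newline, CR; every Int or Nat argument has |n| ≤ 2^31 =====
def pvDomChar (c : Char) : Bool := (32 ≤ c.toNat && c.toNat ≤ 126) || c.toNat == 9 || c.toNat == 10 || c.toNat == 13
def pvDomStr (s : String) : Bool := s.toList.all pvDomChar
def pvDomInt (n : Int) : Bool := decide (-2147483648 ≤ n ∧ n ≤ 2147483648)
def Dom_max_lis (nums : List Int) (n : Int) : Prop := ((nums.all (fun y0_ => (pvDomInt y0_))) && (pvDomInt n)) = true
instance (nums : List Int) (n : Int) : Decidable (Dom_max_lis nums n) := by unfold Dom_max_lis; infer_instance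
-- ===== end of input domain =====

-- B replaces patience sorting (bisect_left on a tails list) by the classic quadratic
-- LIS dynamic programming over all earlier indices; alternative decomposition, not faster.

-- ===== PORT A =====
-- one iteration of A's loop body: state is (my_list, ele)
def maxLisStepA (nums : List Int) (st : List Int × List Int) (i : Int) : List Int × List Int :=
  let myList := st.1
  let ele := st.2
  if myList = [] then
    let myList' := myList ++ [PySem.List.pyGetD nums i 0]
    (myList', PySem.List.pySetD ele i ((myList'.length : Int)))
  else
    let val := PySem.List.bisectLeft myList (PySem.List.pyGetD nums i 0)
    let myList' :=
      if val = myList.length then myList ++ [PySem.List.pyGetD nums i 0]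
      else myList.set val (PySem.List.pyGetD nums i 0)
    (myList', PySem.List.pySetD ele i ((myList'.length : Int)))

def max_lis (nums : List Int) (n : Int) : List Int :=
  ((PySem.List.pyRange 0 n 1).foldl (maxLisStepA nums)
    (([] : List Int), List.replicate n.toNat (0 : Int))).2

-- ===== PORT B =====
-- B's inner loop: m = max dp[j] over j < i with nums[j] < x (0 if none)
def maxLisInnerB (nums dp : List Int) (x : Int) (i : Int) : Int :=
  (PySem.List.pyRange 0 i 1).foldl (fun m j =>
    if PySem.List.pyGetD nums j 0 < x ∧ PySem.List.pyGetD dp j 0 > m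
    then PySem.List.pyGetD dp j 0 else m) 0

-- one iteration of B's loop body: state is (dp, best, ele)
def maxLisStepB (nums : List Int) (st : List Int × Int × List Int) (i : Int) :
    List Int × Int × List Int :=
  let dp := st.1
  let best := st.2.1
  let ele := st.2.2
  let x := PySem.List.pyGetD nums i 0
  let m := maxLisInnerB nums dp x i
  let dp' := dp ++ [m + 1]
  let best' := if m + 1 > best then m + 1 else best
  (dp', best', ele ++ [best'])

def max_lis_alt (nums : List Int) (n : Int) : List Int :=
  ((PySem.List.pyRange 0 n 1).foldl (maxLisStepB nums)
    (([] : List Int), (0 : Int), ([] : List Int))).2.2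

-- ===== PRECONDITION & SPEC =====
-- Pre_ excludes exactly the inputs where Python A raises IndexError: n > len(nums).
def Pre_max_lis (nums : List Int) (n : Int) : Prop := n ≤ (nums.length : Int)
instance (nums : List Int) (n : Int) : Decidable (Pre_max_lis nums n) := by
  unfold Pre_max_lis; infer_instance

def pvWitness_max_lis : List Int × Int := ([1, 3, 2, 3], 4)

def Spec_max_lis (nums : List Int) (n : Int) (out : List Int) : Prop := out = max_lis_alt nums n
instance (nums : List Int) (n : Int) (out : List Int) : Decidable (Spec_max_lis nums n out) := by
  unfold Spec_max_lis; infer_instance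

-- ===== CLAIM (what is proved, stated in full; the proofs are below) =====
def Claim_equal_max_lis : Prop := ∀ (nums : List Int) (n : Int), Dom_max_lis nums n →
  Pre_max_lis nums n → Spec_max_lis nums n (max_lis nums n)

-- ===== LEMMAS AND PROOFS =====

-- insertion into a sorted tails list, phrased recursively (equal to A's bisect step on sorted lists)
def insRec : List Int → Int → List Int
  | [], x => [x]
  | t :: ts, x => if t < x then t :: insRec ts x else x :: ts

theorem mem_insRec {y x : Int} {ts : List Int} (h : y ∈ insRec ts x) : y = x ∨ y ∈ ts := by
  induction ts with
  | nil => simp [insRec] at h; tauto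
  | cons t ts ih =>
    by_cases ht : t < x <;> simp [insRec, ht] at h <;> rcases h with h | h <;> simp_all <;> tauto

theorem countP_eq_zero_of_sorted_le {z t : Int} {ts : List Int}
    (hs : (t :: ts).Pairwise (· < ·)) (hz : z ≤ t) :
    ts.countP (fun y => decide (y < z)) = 0 := by
  rw [List.countP_eq_zero]
  intro a ha
  have := (List.pairwise_cons.1 hs).1 a ha
  simp; omega

theorem insRec_sorted {ts : List Int} {x : Int} (hs : ts.Pairwise (· < ·)) :
    (insRec ts x).Pairwise (· < ·) := by
  induction ts with
  | nil => simp [insRec]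
  | cons t ts ih =>
    rcases List.pairwise_cons.1 hs with ⟨hlt, hts⟩
    by_cases ht : t < x
    · simp only [insRec, if_pos ht]
      refine List.pairwise_cons.2 ⟨?_, ih hts⟩
      intro y hy
      rcases mem_insRec hy with rfl | hy
      · exact ht
      · exact hlt y hy
    · simp only [insRec, if_neg ht]
      refine List.pairwise_cons.2 ⟨?_, hts⟩
      intro y hy
      have := hlt y hy; omega

theorem insRec_countP {ts : List Int} (x y : Int) (hs : ts.Pairwise (· < ·)) :
    (insRec ts x).countP (fun v => decide (v < y)) =
      if x < y then
        max (ts.countP (fun v => decide (v < y))) (ts.countP (fun v => decide (v < x)) + 1)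
      else ts.countP (fun v => decide (v < y)) := by
  induction ts with
  | nil => by_cases hxy : x < y <;> simp [insRec, hxy]
  | cons t ts ih =>
    rcases List.pairwise_cons.1 hs with ⟨hlt, hts⟩
    by_cases ht : t < x
    · have htsx : (t :: ts).countP (fun v => decide (v < x)) =
          ts.countP (fun v => decide (v < x)) + 1 := by simp [ht]
      simp only [insRec, if_pos ht]
      by_cases hxy : x < y
      · have hty : t < y := lt_trans ht hxy
        have e1 : (t :: insRec ts x).countP (fun v => decide (v < y)) =
            (insRec ts x).countP (fun v => decide (v < y)) + 1 := by
          simp [hty]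
        have e2 : (t :: ts).countP (fun v => decide (v < y)) =
            ts.countP (fun v => decide (v < y)) + 1 := by
          simp [hty]
        rw [e1, e2, htsx, ih hts]
        simp only [if_pos hxy]
        omega
      · simp only [List.countP_cons, ih hts, if_neg hxy]
    · -- x ≤ t: every element of ts exceeds t ≥ x, so none is < x
      have hcx : ts.countP (fun v => decide (v < x)) = 0 :=
        countP_eq_zero_of_sorted_le hs (by omega)
      simp only [insRec, if_neg ht]
      by_cases hxy : x < y
      · by_cases hty : t < y
        · simp [hxy, hty, hcx, ht]
        · have hcy : ts.countP (fun v => decide (v < y)) = 0 :=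
            countP_eq_zero_of_sorted_le hs (by omega)
          simp [List.countP_cons, hxy, hty, hcx, hcy]
          omega
      · have hxt : ¬ t < y := by omega
        simp [hxy, hxt]

theorem insRec_length {ts : List Int} (x : Int) (hs : ts.Pairwise (· < ·)) :
    (insRec ts x).length =
      if ts.countP (fun v => decide (v < x)) = ts.length then ts.length + 1 else ts.length := by
  induction ts with
  | nil => simp [insRec]
  | cons t ts ih =>
    rcases List.pairwise_cons.1 hs with ⟨hlt, hts⟩
    by_cases ht : t < x
    · have e : insRec (t :: ts) x = t :: insRec ts x := by simp [insRec, ht]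
      have ec : (t :: ts).countP (fun v => decide (v < x)) =
          ts.countP (fun v => decide (v < x)) + 1 := by simp [ht]
      rw [e, ec]
      simp only [List.length_cons, ih hts]
      split_ifs with h1 h2 h3 <;> omega
    · have hcx : ts.countP (fun v => decide (v < x)) = 0 :=
        countP_eq_zero_of_sorted_le hs (by omega)
      have e : insRec (t :: ts) x = x :: ts := by simp [insRec, ht]
      have ec : (t :: ts).countP (fun v => decide (v < x)) = 0 := by
        simp [ht, hcx]
      simp [e, ec]

-- bisect_left on a strictly sorted list is the number of elements < x
theorem bisectLeft_eq_countP (xs : List Int) (x : Int) (hs : xs.Pairwise (· < ·)) :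
    PySem.List.bisectLeft xs x = xs.countP (fun v => decide (v < x)) := by
  obtain ⟨hle, hlt, hge⟩ := PySem.List.bisectLeft_spec xs x (hs.imp le_of_lt)
  set v := PySem.List.bisectLeft xs x with hv
  have hsplit := List.take_append_drop v xs
  have h1 : (xs.take v).countP (fun w => decide (w < x)) = v := by
    have hall : ∀ a ∈ xs.take v, (fun w => decide (w < x)) a = true := by
      intro a ha
      rw [List.mem_iff_getElem] at ha
      obtain ⟨j, hj, rfl⟩ := ha
      have hjv : j < v := lt_of_lt_of_le hj (by simp)
      have hjlen : j < xs.length := lt_of_lt_of_le hjv hle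
      have := hlt j hjlen hjv
      simp_all [List.getElem_take]
    rw [List.countP_eq_length.2 hall, List.length_take]
    omega
  have h2 : (xs.drop v).countP (fun w => decide (w < x)) = 0 := by
    rw [List.countP_eq_zero]
    intro a ha
    rw [List.mem_iff_getElem] at ha
    obtain ⟨j, hj, rfl⟩ := ha
    have hjlen : v + j < xs.length := by simp at hj; omega
    have := hge (v + j) hjlen (by omega)
    simp_all [List.getElem_drop]
  calc v = (xs.take v).countP (fun w => decide (w < x)) +
            (xs.drop v).countP (fun w => decide (w < x)) := by omega
    _ = xs.countP (fun w => decide (w < x)) := by rw [← List.countP_append, hsplit]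

-- A's branch on the bisect position, rewritten through countP, is insRec
theorem countP_branch_eq_insRec (ts : List Int) (x : Int) (hs : ts.Pairwise (· < ·)) :
    (if ts.countP (fun v => decide (v < x)) = ts.length then ts ++ [x]
     else ts.set (ts.countP (fun v => decide (v < x))) x) = insRec ts x := by
  induction ts with
  | nil => simp [insRec]
  | cons t ts ih =>
    rcases List.pairwise_cons.1 hs with ⟨hlt, hts⟩
    by_cases ht : t < x
    · have ec : (t :: ts).countP (fun v => decide (v < x)) =
          ts.countP (fun v => decide (v < x)) + 1 := by simp [ht]
      have e : insRec (t :: ts) x = t :: insRec ts x := by simp [insRec, ht]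
      rw [ec, e, ← ih hts]
      by_cases hc : ts.countP (fun v => decide (v < x)) = ts.length
      · simp [hc]
      · have : ts.countP (fun v => decide (v < x)) + 1 ≠ (t :: ts).length := by
          simp only [List.length_cons]; omega
        simp only [if_neg this, if_neg hc, List.set_cons_succ]
    · have hcx : ts.countP (fun v => decide (v < x)) = 0 :=
        countP_eq_zero_of_sorted_le hs (by omega)
      have ec : (t :: ts).countP (fun v => decide (v < x)) = 0 := by
        simp [ht, hcx]
      have e : insRec (t :: ts) x = x :: ts := by simp [insRec, ht]
      rw [ec, e]
      simp

-- A's loop body produces insRec on a sorted tails list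
theorem stepA_fst (nums : List Int) (tails ele : List Int) (i : Int)
    (hs : tails.Pairwise (· < ·)) :
    (maxLisStepA nums (tails, ele) i).1 = insRec tails (PySem.List.pyGetD nums i 0) := by
  by_cases h0 : tails = []
  · subst h0; simp [maxLisStepA, insRec]
  · simp only [maxLisStepA, if_neg h0]
    rw [bisectLeft_eq_countP tails _ hs]
    exact countP_branch_eq_insRec tails _ hs

-- additional small bridges used by the main induction
theorem pyGetD_append_left_int (dp l : List Int) (j d : Int) (h0 : 0 ≤ j)
    (h : j < (dp.length : Int)) :
    PySem.List.pyGetD (dp ++ l) j d = PySem.List.pyGetD dp j d := by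
  rw [PySem.List.pyGetD_eq_getElem _ d h0 (by simp; omega),
      PySem.List.pyGetD_eq_getElem _ d h0 h]
  exact List.getElem_append_left (by omega)

theorem pyGetD_concat_length (dp : List Int) (v d : Int) :
    PySem.List.pyGetD (dp ++ [v]) (dp.length : Int) d = v := by
  rw [PySem.List.pyGetD_eq_getElem _ d (by positivity) (by simp)]
  exact List.getElem_concat_length (by simp) _

theorem stepA_snd (nums : List Int) (tails ele : List Int) (i : Int) :
    (maxLisStepA nums (tails, ele) i).2 =
      PySem.List.pySetD ele i (((maxLisStepA nums (tails, ele) i).1.length : Nat) : Int) := by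
  by_cases h0 : tails = [] <;> simp [maxLisStepA, h0]

-- the fold states of the two ports after k iterations
def pvFoldA (nums : List Int) (N k : Nat) : List Int × List Int :=
  (PySem.List.pyRange 0 (k : Int) 1).foldl (maxLisStepA nums)
    (([] : List Int), List.replicate N (0 : Int))

def pvFoldB (nums : List Int) (k : Nat) : List Int × Int × List Int :=
  (PySem.List.pyRange 0 (k : Int) 1).foldl (maxLisStepB nums)
    (([] : List Int), (0 : Int), ([] : List Int))

theorem pvFoldA_succ (nums : List Int) (N k : Nat) :
    pvFoldA nums N (k + 1) = maxLisStepA nums (pvFoldA nums N k) (k : Int) := by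
  simp only [pvFoldA]
  push_cast
  rw [PySem.List.pyRange_one_succ_right (by positivity), List.foldl_append]
  simp

theorem pvFoldB_succ (nums : List Int) (k : Nat) :
    pvFoldB nums (k + 1) = maxLisStepB nums (pvFoldB nums k) (k : Int) := by
  simp only [pvFoldB]
  push_cast
  rw [PySem.List.pyRange_one_succ_right (by positivity), List.foldl_append]
  simp

-- the joint loop invariant of the two ports
theorem main_inv (nums : List Int) (N : Nat) :
    ∀ k : Nat, k ≤ N →
     (pvFoldA nums N k).1.Pairwise (· < ·) ∧
     (pvFoldB nums k).1.length = k ∧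
     (∀ x : Int, (((pvFoldA nums N k).1.countP (fun v => decide (v < x)) : Nat) : Int) =
        maxLisInnerB nums (pvFoldB nums k).1 x (k : Int)) ∧
     (((pvFoldA nums N k).1.length : Int) = (pvFoldB nums k).2.1) ∧
     (pvFoldB nums k).2.2.length = k ∧
     (pvFoldA nums N k).2 = (pvFoldB nums k).2.2 ++ List.replicate (N - k) 0 := by
  intro k
  induction k with
  | zero =>
    intro _
    have h0 : pvFoldA nums N 0 = ([], List.replicate N 0) := by
      simp [pvFoldA, PySem.List.pyRange_one_eq_nil le_rfl]
    have h1 : pvFoldB nums 0 = ([], 0, []) := by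
      simp [pvFoldB, PySem.List.pyRange_one_eq_nil le_rfl]
    rw [h0, h1]
    refine ⟨by simp, by simp, ?_, by simp, by simp, by simp⟩
    intro x
    simp [maxLisInnerB, PySem.List.pyRange_one_eq_nil le_rfl]
  | succ k ih =>
    intro hk1
    have hkN : k ≤ N := Nat.le_of_succ_le hk1
    obtain ⟨hsort, hdplen, hcnt, hlen, heblen, hea⟩ := ih hkN
    rcases hA : pvFoldA nums N k with ⟨tails, eleA⟩
    rcases hB : pvFoldB nums k with ⟨dp, best, eleB⟩
    rw [hA] at hsort hcnt hlen hea
    rw [hB] at hdplen hcnt hlen heblen hea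
    simp only at hsort hdplen hcnt hlen heblen hea
    set x := PySem.List.pyGetD nums (k : Int) 0 with hx
    set m := maxLisInnerB nums dp x (k : Int) with hm
    have hmc : ∀ y : Int, maxLisInnerB nums dp y (k : Int) =
        ((tails.countP (fun v => decide (v < y)) : Nat) : Int) := fun y => (hcnt y).symm
    have hmx : m = ((tails.countP (fun v => decide (v < x)) : Nat) : Int) := hmc x
    have hcle : tails.countP (fun v => decide (v < x)) ≤ tails.length :=
      List.countP_le_length
    have hBs : pvFoldB nums (k + 1) =
        (dp ++ [m + 1], (if m + 1 > best then m + 1 else best),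
         eleB ++ [if m + 1 > best then m + 1 else best]) := by
      rw [pvFoldB_succ, hB]
      simp only [maxLisStepB]
      rw [← hx, ← hm]
    have hAs1 : (pvFoldA nums N (k + 1)).1 = insRec tails x := by
      rw [pvFoldA_succ, hA]
      exact stepA_fst nums tails eleA _ hsort
    have hAs2 : (pvFoldA nums N (k + 1)).2 =
        PySem.List.pySetD eleA (k : Int) (((insRec tails x).length : Nat) : Int) := by
      rw [pvFoldA_succ, hA, stepA_snd, stepA_fst nums tails eleA _ hsort]
    have hlenIns : (((insRec tails x).length : Nat) : Int) =
        (if m + 1 > best then m + 1 else best) := by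
      rw [insRec_length x hsort]
      split_ifs with hc hgt hgt <;> push_cast <;> omega
    refine ⟨?_, ?_, ?_, ?_, ?_, ?_⟩
    · rw [hAs1]; exact insRec_sorted hsort
    · rw [hBs]; simp [hdplen]
    · intro y
      rw [hAs1, hBs]
      simp only
      have hcast : (((k + 1 : Nat)) : Int) = (k : Int) + 1 := by push_cast; ring
      rw [hcast]
      unfold maxLisInnerB
      rw [PySem.List.pyRange_one_succ_right (by positivity), List.foldl_append]
      simp only [List.foldl_cons, List.foldl_nil]
      have hpref : (PySem.List.pyRange 0 (k : Int) 1).foldl (fun acc j =>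
          if PySem.List.pyGetD nums j 0 < y ∧ PySem.List.pyGetD (dp ++ [m + 1]) j 0 > acc
          then PySem.List.pyGetD (dp ++ [m + 1]) j 0 else acc) 0 =
          maxLisInnerB nums dp y (k : Int) := by
        unfold maxLisInnerB
        apply PySem.List.foldl_congr_mem
        intro acc j hj
        rw [PySem.List.mem_pyRange_one] at hj
        rw [pyGetD_append_left_int dp [m + 1] j 0 hj.1 (by rw [hdplen]; exact hj.2)]
      rw [hpref, hmc y]
      have hdk : PySem.List.pyGetD (dp ++ [m + 1]) (k : Int) 0 = m + 1 := by
        have h := pyGetD_concat_length dp (m + 1) 0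
        rw [hdplen] at h
        exact h
      rw [← hx, hdk, insRec_countP x y hsort]
      by_cases hxy : x < y
      · rw [if_pos hxy]
        by_cases h2 : (m + 1 : Int) > ((tails.countP (fun v => decide (v < y)) : Nat) : Int)
        · rw [if_pos ⟨hxy, h2⟩]
          push_cast at *
          omega
        · rw [if_neg (by tauto)]
          push_cast at *
          omega
      · rw [if_neg hxy, if_neg (by tauto)]
    · rw [hAs1, hBs]
      simp only
      exact_mod_cast hlenIns
    · rw [hBs]; simp [heblen]
    · rw [hAs2, hBs]
      simp only
      rw [hlenIns, hea]
      have hNk : N - k = (N - (k + 1)) + 1 := by omega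
      rw [hNk, List.replicate_succ, PySem.List.pySetD_natCast, List.set_append,
          if_neg (by rw [heblen]; omega), heblen, Nat.sub_self]
      rw [List.set_cons_zero, List.append_cons]

-- ===== VERDICT (by name: the statement is the Claim_ definition above) =====
theorem max_lis_spec : Claim_equal_max_lis := by
  intro nums n _ _
  unfold Spec_max_lis
  by_cases hn : n ≤ 0
  · unfold max_lis max_lis_alt
    rw [PySem.List.pyRange_one_eq_nil hn]
    simp [Int.toNat_of_nonpos hn]
  · have h0 : (0 : Int) ≤ n := by omega
    have hcast : ((n.toNat : Nat) : Int) = n := Int.toNat_of_nonneg h0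
    obtain ⟨_, _, _, _, _, hea⟩ := main_inv nums n.toNat n.toNat le_rfl
    unfold max_lis max_lis_alt
    rw [show PySem.List.pyRange 0 n 1 = PySem.List.pyRange 0 ((n.toNat : Nat) : Int) 1 by
      rw [hcast]]
    show (pvFoldA nums n.toNat n.toNat).2 = (pvFoldB nums n.toNat).2.2
    rw [hea]
    simp
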